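-- pv_equiv track=rewrite | github.com/boredchilada/spiderfoot-revival | spiderfoot/services/preset_service.py | validate_module_names
-- ===== SOURCE A (Python) =====
-- from typing import Iterable
--
-- def validate_module_names(names: Iterable[str], modules: dict) -> tuple:
--     """Split an iterable of module names into (valid, invalid) lists.
--
--     Deduplicates: each name appears at most once across the two outputs,
--     in first-seen order. Order within each list reflects first-encounter
--     order in the input iterable.
--     """
--     seen = set()
--     valid = []
--     invalid = []
--     for n in names:
--         if n in seen:
--             continue
--         seen.add(n)
--         if n in modules:
--             valid.append(n)
--         else:
--             invalid.append(n)
--     return valid, invalid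
-- ===== SOURCE B (Python) =====
-- def validate_module_names(names, modules):
--     """Split an iterable of module names into (valid, invalid) dedup lists.
--
--     Builds the outputs back-to-front: walking the names in reverse, each name
--     is moved to the end of its partition dict (deleting the later duplicate
--     already there), so keeping-the-first-occurrence emerges from reverse-order
--     reinsertion rather than from a seen-set guard; the key orders are then
--     reversed into first-seen order.
--     """
--     valid = {}
--     invalid = {}
--     for n in reversed(list(names)):
--         out = valid if n in modules else invalid
--         if n in out:
--             del out[n]
--         out[n] = True
--     return list(reversed(valid)), list(reversed(invalid))
-- ===== Notes on version B (the rewrite author's own statement) =====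
-- stated objective: alternative
-- what changed: B walks the names in reverse with no seen-set, moving each name to the end of its partition dict (delete the later duplicate, reinsert), and reverses the key orders at the end, so first-seen dedup emerges from back-to-front reinsertion instead of a membership guard in a forward loop.
import Mathlib
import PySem

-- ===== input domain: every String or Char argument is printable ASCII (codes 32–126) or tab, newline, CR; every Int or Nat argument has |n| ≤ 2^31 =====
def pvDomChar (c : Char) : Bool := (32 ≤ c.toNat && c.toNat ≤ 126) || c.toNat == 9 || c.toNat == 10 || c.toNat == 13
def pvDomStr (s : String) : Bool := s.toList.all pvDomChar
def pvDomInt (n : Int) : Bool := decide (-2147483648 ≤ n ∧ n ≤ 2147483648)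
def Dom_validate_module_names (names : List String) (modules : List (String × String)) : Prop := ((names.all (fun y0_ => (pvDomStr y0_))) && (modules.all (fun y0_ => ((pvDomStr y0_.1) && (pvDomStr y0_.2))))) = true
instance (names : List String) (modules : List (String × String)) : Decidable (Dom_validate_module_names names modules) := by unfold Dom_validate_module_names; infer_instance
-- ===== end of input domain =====

-- B replaces A's forward seen-set loop by a reverse walk that moves each name to the end of
-- its partition dict (delete the later duplicate, reinsert) and reverses the key orders at
-- the end; same return value, objective: alternative.

-- ===== PORT A =====
def validate_module_names (names : List String) (modules : List (String × String)) : List String × List String :=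
  let st := names.foldl
    (fun (st : PySem.Set String × List String × List String) n =>
      if n ∈ st.1 then st
      else
        let seen := st.1.add n
        if modules.any (fun kv => kv.1 == n) then (seen, st.2.1 ++ [n], st.2.2)
        else (seen, st.2.1, st.2.2 ++ [n]))
    (PySem.Set.empty, [], [])
  (st.2.1, st.2.2)

-- ===== PORT B =====
-- `n in out` / `del out[n]` / `out[n] = True` on the two partition dicts; `list(reversed(d))` = keys reversed
def validate_module_names_alt (names : List String) (modules : List (String × String)) : List String × List String :=
  let st := (names.reverse).foldl
    (fun (st : PySem.Dict String Bool × PySem.Dict String Bool) n =>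
      if modules.any (fun kv => kv.1 == n) then
        ((if st.1.contains n then st.1.erase n else st.1).insert n true, st.2)
      else
        (st.1, (if st.2.contains n then st.2.erase n else st.2).insert n true))
    (PySem.Dict.empty, PySem.Dict.empty)
  ((st.1.keys).reverse, (st.2.keys).reverse)

-- ===== PRECONDITION & SPEC =====
def Spec_validate_module_names (names : List String) (modules : List (String × String)) (out : List String × List String) : Prop := out = validate_module_names_alt names modules
instance (names : List String) (modules : List (String × String)) (out : List String × List String) : Decidable (Spec_validate_module_names names modules out) := by unfold Spec_validate_module_names; infer_instance

-- ===== CLAIM (what is proved, stated in full; the proofs are below) =====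
def Claim_equal_validate_module_names : Prop := ∀ (names : List String) (modules : List (String × String)), Dom_validate_module_names names modules → Spec_validate_module_names names modules (validate_module_names names modules)

-- ===== LEMMAS AND PROOFS =====

-- the elements of `names` that are new relative to `seen`, deduplicated, in first-seen order
def pvFresh (seen : PySem.Set String) : List String → List String
  | [] => []
  | n :: ns => if n ∈ seen then pvFresh seen ns else n :: pvFresh (seen ++ [n]) ns

theorem pvFoldA_eq (modules : List (String × String)) :
    ∀ (names : List String) (seen : PySem.Set String) (v i : List String),
    names.foldl
      (fun (st : PySem.Set String × List String × List String) n =>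
        if n ∈ st.1 then st
        else
          let seen := st.1.add n
          if modules.any (fun kv => kv.1 == n) then (seen, st.2.1 ++ [n], st.2.2)
          else (seen, st.2.1, st.2.2 ++ [n]))
      (seen, v, i)
    = (names.foldl PySem.Set.add seen,
       v ++ (pvFresh seen names).filter (fun n => modules.any (fun kv => kv.1 == n)),
       i ++ (pvFresh seen names).filter (fun n => !modules.any (fun kv => kv.1 == n))) := by
  intro names
  induction names with
  | nil => simp [pvFresh]
  | cons n ns ih =>
    intro seen v i
    simp only [List.foldl_cons]
    by_cases h : n ∈ seen
    · have hadd : PySem.Set.add seen n = seen := by simp [PySem.Set.add, h]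
      rw [if_pos h, ih, hadd]
      simp [pvFresh, h]
    · have hadd : PySem.Set.add seen n = seen ++ [n] := by simp [PySem.Set.add, h]
      by_cases hp : modules.any (fun kv => kv.1 == n) = true
      · rw [if_neg h, if_pos hp, ih, hadd]
        simp [pvFresh, h, hp]
      · rw [if_neg h, if_neg hp, ih, hadd]
        simp [pvFresh, h, hp]

-- pvFresh only depends on the membership of `seen`
theorem pvFresh_congr : ∀ (ns : List String) (s1 s2 : List String),
    (∀ a, a ∈ s1 ↔ a ∈ s2) → pvFresh s1 ns = pvFresh s2 ns := by
  intro ns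
  induction ns with
  | nil => intro _ _ _; rfl
  | cons n ns ih =>
    intro s1 s2 h
    by_cases hn : n ∈ s1
    · simp [pvFresh, hn, (h n).mp hn, ih _ _ h]
    · have hn2 : n ∉ s2 := fun hx => hn ((h n).mpr hx)
      simp only [pvFresh, if_neg hn, if_neg hn2]
      refine congrArg _ (ih _ _ ?_)
      intro a; simp [h a]

-- every element of the fresh list lies outside `seen`
theorem pvFresh_not_mem : ∀ (ns seen : List String), ∀ a ∈ pvFresh seen ns, a ∉ seen := by
  intro ns
  induction ns with
  | nil => intro _ a ha; cases ha
  | cons n ns ih =>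
    intro seen a ha
    by_cases hn : n ∈ seen
    · rw [pvFresh, if_pos hn] at ha
      exact ih _ _ ha
    · rw [pvFresh, if_neg hn] at ha
      rcases List.mem_cons.1 ha with rfl | ha
      · exact hn
      · intro hs
        exact ih _ _ ha (List.mem_append.2 (Or.inl hs))

-- adding n to `seen` = filtering n out of the fresh list
theorem pvFresh_filter : ∀ (ns : List String) (seen : List String) (n : String), n ∉ seen →
    pvFresh (seen ++ [n]) ns = (pvFresh seen ns).filter (fun x => !(x == n)) := by
  intro ns
  induction ns with
  | nil => intro _ _ _; rfl
  | cons x xs ih =>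
    intro seen n hn
    by_cases hx : x ∈ seen
    · have hx2 : x ∈ seen ++ [n] := by simp [hx]
      simp [pvFresh, hx, hx2, ih _ _ hn]
    · by_cases hxn : x = n
      · subst hxn
        have hx2 : x ∈ seen ++ [x] := by simp
        rw [pvFresh, if_pos hx2, pvFresh, if_neg hx, List.filter_cons]
        simp only [beq_self_eq_true, Bool.not_true, Bool.false_eq_true, if_false]
        symm
        refine List.filter_eq_self.2 ?_
        intro a ha
        have : a ∉ seen ++ [x] := pvFresh_not_mem _ _ a ha
        have : a ≠ x := fun h => this (by simp [h])
        simp [this]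
      · have hx2 : x ∉ seen ++ [n] := by
          intro h
          rcases List.mem_append.1 h with h1 | h1
          · exact hx h1
          · exact hxn (List.mem_singleton.1 h1)
        have hbne : (x == n) = false := by simp [hxn]
        rw [pvFresh, if_neg hx2, pvFresh, if_neg hx, List.filter_cons]
        simp only [hbne, Bool.not_false, if_true]
        refine congrArg _ ?_
        have hn2 : n ∉ seen ++ [x] := by
          intro h
          rcases List.mem_append.1 h with h1 | h1
          · exact hn h1
          · exact hxn (List.mem_singleton.1 h1).symm
        rw [← ih _ _ hn2]
        refine pvFresh_congr _ _ _ ?_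
        intro a; simp; tauto

-- two filters commute
theorem filter_comm_ne (p : String → Bool) (n : String) (l : List String) :
    (l.filter (fun x => !(x == n))).filter p = (l.filter p).filter (fun x => !(x == n)) := by
  rw [List.filter_filter, List.filter_filter]
  refine congrFun (congrArg _ ?_) l
  funext x
  exact Bool.and_comm _ _

-- filtering n out is invisible to a filter that rejects n anyway
theorem filter_drop (pq : String → Bool) (n : String) (h : pq n = false) (l : List String) :
    (l.filter (fun x => !(x == n))).filter pq = l.filter pq := by
  rw [List.filter_filter]
  refine congrFun (congrArg _ ?_) l
  funext x
  by_cases hx : x = n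
  · subst hx; simp [h]
  · simp [hx]

-- one loop step on a partition dict: drop the key, append it at the end
theorem step_items (d : PySem.Dict String Bool) (n : String) :
    ((if d.contains n then d.erase n else d).insert n true).items
    = d.items.filter (fun q => !(q.1 == n)) ++ [(n, true)] := by
  by_cases h : d.contains n = true
  · rw [if_pos h]
    have hc : (d.erase n).contains n = false := by
      simp [PySem.Dict.erase, PySem.Dict.contains, List.any_filter]
    rw [PySem.Dict.items_insert_of_not_contains _ _ hc]
    rfl
  · have h' : d.contains n = false := Bool.eq_false_iff.mpr h
    rw [if_neg h, PySem.Dict.items_insert_of_not_contains _ _ h']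
    refine congrArg (· ++ [(n, true)]) ?_
    refine (List.filter_eq_self.2 ?_).symm
    intro q hq
    have h2 : d.items.any (fun p => p.1 == n) = false := h'
    have hall := List.any_eq_false.mp h2
    simpa using hall q hq

-- B's reverse loop computes the reversed filters of the fresh list, as partition dicts
theorem pvFoldB_eq (modules : List (String × String)) :
    ∀ (names : List String),
    names.foldr
      (fun n (st : PySem.Dict String Bool × PySem.Dict String Bool) =>
        if modules.any (fun kv => kv.1 == n) then
          ((if st.1.contains n then st.1.erase n else st.1).insert n true, st.2)
        else
          (st.1, (if st.2.contains n then st.2.erase n else st.2).insert n true))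
      (PySem.Dict.empty, PySem.Dict.empty)
    = (PySem.Dict.mk ((((pvFresh [] names).filter (fun m => modules.any (fun kv => kv.1 == m))).reverse).map (fun k => (k, true))),
       PySem.Dict.mk ((((pvFresh [] names).filter (fun m => !modules.any (fun kv => kv.1 == m))).reverse).map (fun k => (k, true)))) := by
  intro names
  induction names with
  | nil => rfl
  | cons n ns ih =>
    have hfr : pvFresh ([] : PySem.Set String) (n :: ns) = n :: pvFresh [n] ns := by
      simp [pvFresh]
    have hflt : pvFresh ([n] : List String) ns = (pvFresh [] ns).filter (fun x => !(x == n)) :=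
      pvFresh_filter ns [] n (by simp)
    rw [List.foldr_cons, ih, hfr, hflt]
    by_cases hp : modules.any (fun kv => kv.1 == n) = true
    · rw [if_pos hp]
      simp only [Prod.mk.injEq]
      refine ⟨?_, ?_⟩
      · refine PySem.Dict.ext ?_
        rw [step_items]
        simp only [List.filter_map, List.filter_reverse]
        rw [List.filter_cons]
        simp only [hp, if_true, List.reverse_cons, List.map_append, List.map_cons, List.map_nil]
        refine congrArg (· ++ [(n, true)]) ?_
        refine congrArg _ (congrArg _ ?_)
        have : ((fun q : String × Bool => !(q.1 == n)) ∘ fun k => (k, true)) = fun x => !(x == n) := rfl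
        rw [this, filter_comm_ne]
      · refine PySem.Dict.ext ?_
        rw [List.filter_cons_of_neg (by simp [hp])]
        exact congrArg (List.map (fun k => (k, (true : Bool)))) (congrArg List.reverse (filter_drop (fun m => !modules.any (fun kv => kv.1 == m)) n (by simp [hp]) _).symm)
    · have hp' : modules.any (fun kv => kv.1 == n) = false := Bool.eq_false_iff.mpr hp
      rw [if_neg hp]
      simp only [Prod.mk.injEq]
      refine ⟨?_, ?_⟩
      · refine PySem.Dict.ext ?_
        rw [List.filter_cons_of_neg (by simp [hp'])]
        exact congrArg (List.map (fun k => (k, (true : Bool)))) (congrArg List.reverse (filter_drop (fun m => modules.any (fun kv => kv.1 == m)) n hp' _).symm)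
      · refine PySem.Dict.ext ?_
        rw [step_items]
        simp only [List.filter_map, List.filter_reverse]
        rw [List.filter_cons]
        simp only [hp', Bool.not_false, if_true, List.reverse_cons, List.map_append, List.map_cons, List.map_nil]
        refine congrArg (· ++ [(n, true)]) ?_
        refine congrArg _ (congrArg _ ?_)
        have : ((fun q : String × Bool => !(q.1 == n)) ∘ fun k => (k, true)) = fun x => !(x == n) := rfl
        rw [this, filter_comm_ne]

-- ===== VERDICT (by name: the statement is the Claim_ definition above) =====
theorem validate_module_names_spec : Claim_equal_validate_module_names := by
  intro names modules _
  show validate_module_names names modules = validate_module_names_alt names modules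
  unfold validate_module_names validate_module_names_alt
  rw [pvFoldA_eq, List.foldl_reverse, pvFoldB_eq]
  simp only [PySem.Set.empty, PySem.Dict.keys_mk, List.map_map, List.map_reverse, List.reverse_reverse]
  have hid : (((fun x : String × Bool => x.1) ∘ fun k : String => (k, true))) = fun x => x := rfl
  simp [hid]
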